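-- pv_equiv track=rewrite | github.com/mustafa-tariqk/school | CISC121/A4/A4_2.py | hopping_game
-- ===== SOURCE A (Python) =====
-- def hopping_game(n):
--     """This function recursively finds
--     all the paths hopping from 0 to n.
--     """
--     if n == 0:  # Base cases.
--         return ['0']
--     elif n == 1:
--         return ['0-1']
--     elif n == 2:
--         return ['0-1-2', '0-2']
--     else:
--         one_square_hops = hopping_game(n - 1)  # Finds all hop paths.
--         two_square_hops = hopping_game(n - 2)
--
--         for i in range(len(one_square_hops)):  # Proper formatting.
--             one_square_hops[i] += ("-" + str(n))
--         for j in range(len(two_square_hops)):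
--             two_square_hops[j] += ("-" + str(n))
--
--         return one_square_hops + two_square_hops
-- ===== SOURCE B (Python) =====
-- def hopping_game(n):
--     """Iterative bottom-up version: builds path lists for 0..n with a
--     rolling pair instead of top-down recursion."""
--     if n == 0:
--         return ['0']
--     if n == 1:
--         return ['0-1']
--     prev, cur = ['0'], ['0-1']
--     for i in range(2, n + 1):
--         step = str(i)
--         prev, cur = cur, [p + '-' + step for p in cur] + [p + '-' + step for p in prev]
--     return cur
-- ===== Notes on version B (the rewrite author's own statement) =====
-- stated objective: alternative
-- what changed: Replaces the top-down double recursion, which recomputes the same subproblems repeatedly, with a bottom-up loop keeping only the previous two path lists; Pre_ excludes negative inputs, where A recurses forever (RecursionError).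
import Mathlib
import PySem

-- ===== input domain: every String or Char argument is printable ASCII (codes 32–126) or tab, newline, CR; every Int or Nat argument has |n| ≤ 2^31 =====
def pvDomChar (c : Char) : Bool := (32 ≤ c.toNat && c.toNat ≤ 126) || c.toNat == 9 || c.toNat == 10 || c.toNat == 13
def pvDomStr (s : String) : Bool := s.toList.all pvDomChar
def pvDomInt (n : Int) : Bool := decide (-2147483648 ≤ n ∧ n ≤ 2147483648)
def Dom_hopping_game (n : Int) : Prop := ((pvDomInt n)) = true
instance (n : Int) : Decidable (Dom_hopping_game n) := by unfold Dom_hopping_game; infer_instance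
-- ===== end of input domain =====

-- B builds the hop-path lists bottom-up with a rolling pair instead of A's top-down double recursion.


-- ===== PORT A =====
-- A's recursion n ↦ (n-1, n-2) is structural on the natural number n.toNat;
-- for n < 0 Python A recurses forever (excluded by Pre_), the port returns [].
def hopAuxA : Nat → List String
  | 0 => ["0"]
  | 1 => ["0-1"]
  | 2 => ["0-1-2", "0-2"]
  | (k + 3) =>
      let one_square_hops := (hopAuxA (k + 2)).map (fun p => p ++ ("-" ++ PySem.Int.toStr ((k : Int) + 3)))
      let two_square_hops := (hopAuxA (k + 1)).map (fun p => p ++ ("-" ++ PySem.Int.toStr ((k : Int) + 3)))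
      one_square_hops ++ two_square_hops

def hopping_game (n : Int) : List String :=
  if n < 0 then [] else hopAuxA n.toNat

-- ===== PORT B =====
def hopStep (s : List String × List String) (i : Int) : List String × List String :=
  (s.2, s.2.map (fun p => p ++ ("-" ++ PySem.Int.toStr i)) ++ s.1.map (fun p => p ++ ("-" ++ PySem.Int.toStr i)))

def hopping_game_alt (n : Int) : List String :=
  if n = 0 then ["0"]
  else if n = 1 then ["0-1"]
  else ((PySem.List.pyRange 2 (n + 1) 1).foldl hopStep (["0"], ["0-1"])).2

-- ===== PRECONDITION & SPEC =====
-- Pre_ excludes n < 0, on which Python A recurses without a base case (RecursionError).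
def Pre_hopping_game (n : Int) : Prop := 0 ≤ n
instance (n : Int) : Decidable (Pre_hopping_game n) := by unfold Pre_hopping_game; infer_instance
def pvWitness_hopping_game : Int := (5)
def Spec_hopping_game (n : Int) (out : List String) : Prop := out = hopping_game_alt n
instance (n : Int) (out : List String) : Decidable (Spec_hopping_game n out) := by unfold Spec_hopping_game; infer_instance

-- ===== CLAIM (what is proved, stated in full; the proofs are below) =====
def Claim_equal_hopping_game : Prop := ∀ (n : Int), Dom_hopping_game n → Pre_hopping_game n → Spec_hopping_game n (hopping_game n)

-- ===== LEMMAS AND PROOFS =====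

-- B's loop state after processing range(2, k+1) is the pair (paths to k-1, paths to k).
lemma hop_step_eq (m : Nat) (hm : 1 ≤ m) :
    hopStep (hopAuxA (m - 1), hopAuxA m) ((m : Int) + 1) = (hopAuxA m, hopAuxA (m + 1)) := by
  rcases Nat.lt_or_ge m 2 with h2 | h2
  · interval_cases m
    decide
  · rcases Nat.exists_eq_add_of_le h2 with ⟨j, rfl⟩
    have e1 : 2 + j - 1 = j + 1 := by omega
    have e2 : 2 + j = j + 2 := by omega
    have e3 : j + 2 + 1 = j + 3 := by omega
    rw [e1, e2, e3]
    simp only [hopStep, hopAuxA]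
    have hc : ((j + 2 : Nat) : Int) + 1 = ((j : Int) + 3) := by push_cast; ring
    rw [hc]

lemma hop_loop (k : Nat) (hk : 1 ≤ k) :
    (PySem.List.pyRange 2 ((k : Int) + 1) 1).foldl hopStep (["0"], ["0-1"])
      = (hopAuxA (k - 1), hopAuxA k) := by
  induction k with
  | zero => omega
  | succ m ih =>
    rcases Nat.lt_or_ge m 1 with hm | hm
    · interval_cases m
      simp [PySem.List.pyRange_one_eq_nil, hopAuxA]
    · have h2 : (2 : Int) ≤ (m : Int) + 1 := by omega
      rw [show ((m + 1 : Nat) : Int) = (m : Int) + 1 by push_cast; ring,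
          PySem.List.pyRange_one_succ_right h2, List.foldl_append, ih hm]
      simp only [List.foldl]
      rw [hop_step_eq m hm]
      simp

-- ===== VERDICT (by name: the statement is the Claim_ definition above) =====
theorem hopping_game_spec : Claim_equal_hopping_game := by
  intro n _ hpre
  unfold Pre_hopping_game at hpre
  unfold Spec_hopping_game hopping_game hopping_game_alt
  have hn : ¬ n < 0 := by omega
  rw [if_neg hn]
  obtain ⟨k, rfl⟩ : ∃ k : Nat, n = (k : Int) := ⟨n.toNat, (Int.toNat_of_nonneg hpre).symm⟩
  rcases Nat.lt_or_ge k 2 with h2 | h2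
  · interval_cases k <;> decide
  · have hk : 1 ≤ k := by omega
    have hne0 : ((k : Int)) ≠ 0 := by omega
    have hne1 : ((k : Int)) ≠ 1 := by omega
    rw [if_neg hne0, if_neg hne1, hop_loop k hk]
    simp
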